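-- pv_equiv track=rewrite | github.com/tabris1103/inf1340_2014_asst2 | papers.py | is_in_watchlist
-- ===== SOURCE A (Python) =====
-- def is_in_watchlist(first_name, last_name, passport_number, watchlist):
--     """
--     Check whether the provided personal information is in the provided watchlist
--     :param first_name: first name to be checked
--     :param last_name:  last name to be checked
--     :param passport_number: passport number to be checked
--     :param watchlist: watchlist to be checked against
--     :return: True if match was found in the watchlist, False otherwise
--     """
--     in_watchlist = False
--     for watchlist_record in watchlist:
--         first_name_in_watchlist_record = watchlist_record['first_name']
--         last_name_in_watchlist_record = watchlist_record['last_name']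
--         passport_num_in_watchlist_record = watchlist_record['passport']
--
--         if ((first_name.upper() == first_name_in_watchlist_record.upper() and
--             last_name.upper() == last_name_in_watchlist_record.upper())
--                 or passport_number == passport_num_in_watchlist_record):
--             in_watchlist = True
--
--     return in_watchlist
-- ===== SOURCE B (Python) =====
-- def _bisect_member(a, x):
--     lo, hi = 0, len(a)
--     while lo < hi:
--         mid = (lo + hi) // 2
--         if a[mid] < x:
--             lo = mid + 1
--         else:
--             hi = mid
--     return lo < len(a) and a[lo] == x
--
--
-- def is_in_watchlist(first_name, last_name, passport_number, watchlist):
--     # Sort the (NUL-joined, uppercased) name keys and the passports once,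
--     # then answer each of the two questions by binary search.
--     name_keys = sorted(r['first_name'].upper() + '\0' + r['last_name'].upper()
--                        for r in watchlist)
--     passports = sorted(r['passport'] for r in watchlist)
--     return (_bisect_member(name_keys, first_name.upper() + '\0' + last_name.upper())
--             or _bisect_member(passports, passport_number))
-- ===== Notes on version B (the rewrite author's own statement) =====
-- stated objective: alternative
-- what changed: B replaces A's linear OR-scan with a flag by sorting the uppercased NUL-joined name keys and the passports and answering each of the two membership questions with a hand-written binary search.
import Mathlib
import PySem

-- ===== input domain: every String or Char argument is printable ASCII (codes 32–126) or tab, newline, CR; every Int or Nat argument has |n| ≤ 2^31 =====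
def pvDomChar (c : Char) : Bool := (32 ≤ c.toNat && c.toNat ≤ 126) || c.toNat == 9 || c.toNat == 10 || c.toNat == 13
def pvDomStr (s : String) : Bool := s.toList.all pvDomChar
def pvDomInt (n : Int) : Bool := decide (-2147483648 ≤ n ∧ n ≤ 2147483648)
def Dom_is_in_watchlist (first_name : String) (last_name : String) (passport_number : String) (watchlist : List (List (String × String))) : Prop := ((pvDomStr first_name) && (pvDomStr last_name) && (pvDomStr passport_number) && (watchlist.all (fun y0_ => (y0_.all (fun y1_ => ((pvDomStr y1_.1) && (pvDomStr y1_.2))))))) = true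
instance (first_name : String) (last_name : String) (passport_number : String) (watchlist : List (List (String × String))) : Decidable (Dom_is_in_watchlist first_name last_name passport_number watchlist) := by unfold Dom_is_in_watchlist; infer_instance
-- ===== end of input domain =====

-- B sorts the (uppercased, NUL-joined) name keys and the passports once and answers each of the
-- two membership questions with a hand-written binary search, instead of A's linear OR-scan
-- accumulating a flag; same result, a different algorithm (not claimed faster).

-- ===== PORT A =====
-- record field lookup: watchlist_record['k'] (total form; Pre_ guarantees the key is present)
def pvField (r : List (String × String)) (k : String) : String :=
  ((PySem.Dict.mk r).get? k).getD ""

def is_in_watchlist (first_name : String) (last_name : String) (passport_number : String) (watchlist : List (List (String × String))) : Bool :=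
  watchlist.foldl (fun in_watchlist watchlist_record =>
    let first_name_in_watchlist_record := pvField watchlist_record "first_name"
    let last_name_in_watchlist_record := pvField watchlist_record "last_name"
    let passport_num_in_watchlist_record := pvField watchlist_record "passport"
    if (PySem.Str.upper first_name == PySem.Str.upper first_name_in_watchlist_record &&
        PySem.Str.upper last_name == PySem.Str.upper last_name_in_watchlist_record) ||
       passport_number == passport_num_in_watchlist_record
    then true else in_watchlist) false

-- ===== PORT B =====
-- the while-loop of Source B's _bisect_member (bisect_left search), step for step
def pvBMemLoop {α : Type} [LinearOrder α] (a : List α) (x : α) (lo hi : Nat) : Nat :=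
  if lo < hi then
    match a[(lo + hi) / 2]? with
    | some y => if y < x then pvBMemLoop a x ((lo + hi) / 2 + 1) hi
                else pvBMemLoop a x lo ((lo + hi) / 2)
    | none => lo
  else lo
termination_by hi - lo
decreasing_by all_goals omega

def pvBMem {α : Type} [LinearOrder α] [DecidableEq α] (a : List α) (x : α) : Bool :=
  let lo := pvBMemLoop a x 0 a.length
  decide (lo < a.length) && (match a[lo]? with | some y => decide (y = x) | none => false)

-- r['first_name'].upper() + '\0' + r['last_name'].upper()
def pvNameKey (r : List (String × String)) : String :=
  PySem.Str.upper (pvField r "first_name") ++ "\x00" ++ PySem.Str.upper (pvField r "last_name")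

def is_in_watchlist_alt (first_name : String) (last_name : String) (passport_number : String) (watchlist : List (List (String × String))) : Bool :=
  let name_keys := PySem.List.sorted (watchlist.map pvNameKey) (fun s => s) false
  let passports := PySem.List.sorted (watchlist.map (fun r => pvField r "passport")) (fun s => s) false
  pvBMem name_keys (PySem.Str.upper first_name ++ "\x00" ++ PySem.Str.upper last_name) ||
    pvBMem passports passport_number

-- ===== PRECONDITION & SPEC =====
-- Pre_ excludes exactly the records missing one of the keys 'first_name'/'last_name'/'passport',
-- on which the Python A raises KeyError (so does B).
def Pre_is_in_watchlist (first_name : String) (last_name : String) (passport_number : String) (watchlist : List (List (String × String))) : Prop :=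
  ∀ r ∈ watchlist, ((PySem.Dict.mk r).get? "first_name").isSome ∧
    ((PySem.Dict.mk r).get? "last_name").isSome ∧ ((PySem.Dict.mk r).get? "passport").isSome
instance (first_name : String) (last_name : String) (passport_number : String) (watchlist : List (List (String × String))) : Decidable (Pre_is_in_watchlist first_name last_name passport_number watchlist) := by unfold Pre_is_in_watchlist; infer_instance

def pvWitness_is_in_watchlist : String × String × String × (List (List (String × String))) :=
  ("Anna", "Smith", "P123", [[("first_name", "anna"), ("last_name", "SMITH"), ("passport", "Q9")]])

def Spec_is_in_watchlist (first_name : String) (last_name : String) (passport_number : String) (watchlist : List (List (String × String))) (out : Bool) : Prop := out = is_in_watchlist_alt first_name last_name passport_number watchlist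
instance (first_name : String) (last_name : String) (passport_number : String) (watchlist : List (List (String × String))) (out : Bool) : Decidable (Spec_is_in_watchlist first_name last_name passport_number watchlist out) := by unfold Spec_is_in_watchlist; infer_instance

-- ===== CLAIM (what is proved, stated in full; the proofs are below) =====
def Claim_equal_is_in_watchlist : Prop := ∀ (first_name : String) (last_name : String) (passport_number : String) (watchlist : List (List (String × String))), Dom_is_in_watchlist first_name last_name passport_number watchlist → Pre_is_in_watchlist first_name last_name passport_number watchlist → Spec_is_in_watchlist first_name last_name passport_number watchlist (is_in_watchlist first_name last_name passport_number watchlist)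

-- ===== LEMMAS AND PROOFS =====

-- A's flag-accumulating fold is the disjunction over the list
theorem foldl_flag {α : Type} (p : α → Bool) (l : List α) (acc : Bool) :
    l.foldl (fun a x => if p x then true else a) acc = (acc || l.any p) := by
  induction l generalizing acc with
  | nil => simp
  | cons x xs ih =>
    simp only [List.foldl_cons, List.any_cons, ih]
    by_cases h : p x = true <;> simp [h]

theorem any_or {α : Type} (p q : α → Bool) (l : List α) :
    l.any (fun x => p x || q x) = (l.any p || l.any q) := by
  induction l with
  | nil => simp
  | cons x xs ih =>
    simp only [List.any_cons, ih]
    cases p x <;> cases q x <;> simp [Bool.or_comm]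

-- binary-search loop invariant: the result is the first position not below x
theorem pvBMemLoop_spec {α : Type} [LinearOrder α] (a : List α) (x : α)
    (hs : a.Pairwise (· ≤ ·)) :
    ∀ (lo hi : Nat), lo ≤ hi → hi ≤ a.length →
    (∀ j (h : j < a.length), j < lo → a[j] < x) →
    (∀ j (h : j < a.length), hi ≤ j → x ≤ a[j]) →
    pvBMemLoop a x lo hi ≤ a.length ∧
    (∀ j (h : j < a.length), j < pvBMemLoop a x lo hi → a[j] < x) ∧
    (∀ j (h : j < a.length), pvBMemLoop a x lo hi ≤ j → x ≤ a[j]) := by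
  intro lo hi
  fun_induction pvBMemLoop a x lo hi with
  | case1 lo hi hlt y hy hyx ih =>
      intro _ hhi h1 h2
      have hmid : (lo + hi) / 2 < a.length := by
        have := List.getElem?_eq_some_iff.mp hy; omega
      have hyv : a[(lo + hi) / 2] = y := by
        simpa using (List.getElem?_eq_some_iff.mp hy).2
      refine ih (by omega) hhi ?_ h2
      intro j hj hjlt
      have hle : a[j] ≤ a[(lo + hi) / 2] := by
        rcases Nat.lt_or_ge j ((lo + hi) / 2) with h | h
        · exact List.pairwise_iff_getElem.mp hs j _ hj hmid h
        · have : j = (lo + hi) / 2 := by omega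
          subst this; exact le_refl _
      exact lt_of_le_of_lt hle (hyv ▸ hyx)
  | case2 lo hi hlt y hy hyx ih =>
      intro _ hhi h1 h2
      have hmid : (lo + hi) / 2 < a.length := by
        have := List.getElem?_eq_some_iff.mp hy; omega
      have hyv : a[(lo + hi) / 2] = y := by
        simpa using (List.getElem?_eq_some_iff.mp hy).2
      refine ih (by omega) (by omega) h1 ?_
      intro j hj hjge
      have hle : a[(lo + hi) / 2] ≤ a[j] := by
        rcases Nat.lt_or_ge ((lo + hi) / 2) j with h | h
        · exact List.pairwise_iff_getElem.mp hs _ j hmid hj h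
        · have : j = (lo + hi) / 2 := by omega
          subst this; exact le_refl _
      exact le_trans (hyv ▸ le_of_not_gt hyx) hle
  | case3 lo hi hlt hy =>
      intro _ hhi _ _
      have := List.getElem?_eq_none_iff.mp hy
      omega
  | case4 lo hi hge =>
      intro hle hhi h1 h2
      exact ⟨by omega, h1, fun j hj hjge => h2 j hj (by omega)⟩

theorem pvBMem_spec {α : Type} [LinearOrder α] [DecidableEq α] (a : List α) (x : α)
    (hs : a.Pairwise (· ≤ ·)) : pvBMem a x = decide (x ∈ a) := by
  obtain ⟨hle, hlt, hge⟩ := pvBMemLoop_spec a x hs 0 a.length (Nat.zero_le _) (le_refl _)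
    (by omega) (by omega)
  have hdef : pvBMem a x = (decide (pvBMemLoop a x 0 a.length < a.length) &&
      (match a[pvBMemLoop a x 0 a.length]? with | some y => decide (y = x) | none => false)) := rfl
  rw [hdef]
  set r := pvBMemLoop a x 0 a.length with hr
  by_cases hrl : r < a.length
  · rw [List.getElem?_eq_getElem hrl]
    simp only [hrl, decide_true, Bool.true_and]
    rw [Bool.eq_iff_iff, decide_eq_true_eq, decide_eq_true_eq]
    constructor
    · intro h; exact h ▸ List.getElem_mem hrl
    · intro hmem
      obtain ⟨j, hj, hjx⟩ := List.mem_iff_getElem.mp hmem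
      have hrj : r ≤ j := by
        by_contra hc
        exact absurd hjx (ne_of_lt (hlt j hj (by omega)))
      have h1 : a[r] ≤ a[j] := by
        rcases Nat.lt_or_ge r j with h | h
        · exact List.pairwise_iff_getElem.mp hs r j hrl hj h
        · have : r = j := by omega
          subst this; exact le_refl _
      exact le_antisymm (hjx ▸ h1) (hge r hrl (le_refl _))
  · simp only [hrl, decide_false, Bool.false_and]
    symm
    rw [decide_eq_false_iff_not]
    intro hmem
    obtain ⟨j, hj, hjx⟩ := List.mem_iff_getElem.mp hmem
    exact absurd hjx (ne_of_lt (hlt j hj (by omega)))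

-- pvBMem over a sorted copy is plain membership in the original list
theorem pvBMem_sorted {α : Type} [LinearOrder α] [DecidableEq α] (l : List α) (x : α) :
    pvBMem (PySem.List.sorted l (fun s => s) false) x = decide (x ∈ l) := by
  rw [pvBMem_spec _ _ (PySem.List.sorted_pairwise l (fun s => s))]
  simp [PySem.List.mem_sorted]

theorem mem_map_any {α β : Type} [DecidableEq β] (g : α → β) (l : List α) (k : β) :
    decide (k ∈ l.map g) = l.any (fun r => decide (k = g r)) := by
  rw [Bool.eq_iff_iff]
  simp only [List.any_eq_true, decide_eq_true_eq, List.mem_map]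
  exact ⟨fun ⟨a, ha, he⟩ => ⟨a, ha, he.symm⟩, fun ⟨a, ha, he⟩ => ⟨a, ha, he.symm⟩⟩

-- NUL-separated concatenation is injective when the left parts are NUL-free
theorem sep_inj (c : Char) : ∀ (a a' b b' : List Char), c ∉ a → c ∉ a' →
    a ++ c :: b = a' ++ c :: b' → a = a' ∧ b = b' := by
  intro a
  induction a with
  | nil => intro a' b b' _ ha' h
           cases a' with
           | nil => simpa using h
           | cons y t =>
               simp only [List.nil_append, List.cons_append, List.cons.injEq] at h
               obtain ⟨rfl, -⟩ := h
               simp at ha'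
  | cons z zs ih =>
      intro a' b b' ha ha' h
      cases a' with
      | nil =>
          simp only [List.cons_append, List.nil_append, List.cons.injEq] at h
          obtain ⟨rfl, -⟩ := h
          simp at ha
      | cons y t =>
          simp only [List.cons_append, List.cons.injEq] at h
          obtain ⟨rfl, h2⟩ := h
          have := ih t b b' (fun hm => ha (List.mem_cons_of_mem _ hm))
            (fun hm => ha' (List.mem_cons_of_mem _ hm)) h2
          exact ⟨by rw [this.1], this.2⟩

def NoNul (s : String) : Prop := '\x00' ∉ s.toList

theorem noNul_upper (s : String) (h : pvDomStr s = true) : NoNul (PySem.Str.upper s) := by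
  intro hm
  rw [PySem.Str.toList_upper] at hm
  simp only [PySem.Chars.upper, List.mem_map] at hm
  obtain ⟨c, hc, he⟩ := hm
  have hdc := (List.all_eq_true.mp h) _ hc
  unfold PySem.Chars.upperChar at he
  split at he
  · rename_i hl
    simp only [PySem.Chars.islower, Bool.and_eq_true, decide_eq_true_eq] at hl
    have h97 : 97 ≤ c.toNat := hl.1
    have h122 : c.toNat ≤ 122 := hl.2
    have ht := congrArg Char.toNat he
    rw [Char.toNat_ofNat, if_pos (Or.inl (by omega))] at ht
    simp only [show ('\x00' : Char).toNat = 0 from rfl] at ht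
    omega
  · rw [he] at hdc
    exact absurd hdc (by decide)

theorem noNul_field (r : List (String × String)) (k : String)
    (h : r.all (fun y => pvDomStr y.1 && pvDomStr y.2) = true) : pvDomStr (pvField r k) = true := by
  induction r with
  | nil =>
      have h0 : pvField [] k = "" := rfl
      rw [h0]; decide
  | cons p rest ih =>
      simp only [List.all_cons, Bool.and_eq_true] at h
      cases p with
      | mk k' v =>
        have hstep : pvField ((k', v) :: rest) k =
            if (k' == k) then v else pvField rest k := by
          simp only [pvField, PySem.Dict.get?_mk_cons]
          split <;> rfl
        rw [hstep]
        split
        · exact h.1.2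
        · exact ih (by simpa using h.2)

-- the joined key equality is the pair of name equalities
theorem key_eq_iff (uf ul rf rl : String) (h1 : NoNul uf) (h2 : NoNul rf) :
    (uf ++ "\x00" ++ ul = rf ++ "\x00" ++ rl) ↔ (uf = rf ∧ ul = rl) := by
  constructor
  · intro h
    have hl := congrArg String.toList h
    simp only [String.toList_append, show ("\x00" : String).toList = ['\x00'] from rfl,
      List.append_assoc, List.singleton_append] at hl
    have := sep_inj '\x00' uf.toList rf.toList ul.toList rl.toList h1 h2 hl
    exact ⟨String.toList_inj.mp this.1, String.toList_inj.mp this.2⟩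
  · rintro ⟨rfl, rfl⟩; rfl

-- ===== VERDICT (by name: the statement is the Claim_ definition above) =====
theorem any_congr_mem {α : Type} (l : List α) (p q : α → Bool)
    (h : ∀ r ∈ l, p r = q r) : l.any p = l.any q := by
  induction l with
  | nil => rfl
  | cons x xs ih =>
      simp only [List.any_cons]
      rw [h x List.mem_cons_self, ih (fun r hr => h r (List.mem_cons_of_mem _ hr))]

theorem is_in_watchlist_spec : Claim_equal_is_in_watchlist := by
  intro fn ln pn wl hdom hpre
  unfold Spec_is_in_watchlist is_in_watchlist
  simp only [is_in_watchlist_alt]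
  rw [foldl_flag, Bool.false_or, pvBMem_sorted, pvBMem_sorted, mem_map_any, mem_map_any,
    ← any_or]
  simp only [Dom_is_in_watchlist, Bool.and_eq_true] at hdom
  obtain ⟨⟨⟨hfn, hln⟩, hpn⟩, hwl⟩ := hdom
  apply any_congr_mem
  intro r hr
  have hrdom := (List.all_eq_true.mp hwl) _ hr
  have hn1 : NoNul (PySem.Str.upper fn) := noNul_upper _ hfn
  have hn2 : NoNul (PySem.Str.upper (pvField r "first_name")) :=
    noNul_upper _ (noNul_field r _ hrdom)
  rw [Bool.eq_iff_iff]
  simp only [Bool.or_eq_true, Bool.and_eq_true, beq_iff_eq, decide_eq_true_eq, pvNameKey]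
  rw [key_eq_iff _ _ _ _ hn1 hn2]
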